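-- pv_equiv track=rewrite | github.com/DimitrijeG/fax | S1/travel-manager-{python-basics}/host.py | filter_reservations_host
-- ===== SOURCE A (Python) =====
-- def filter_apartments_host(apartments, host):
--     filtered = {}
--     for id, apartment in apartments.items():
--         if apartment['host'] == host:
--             filtered[id] = apartment
--
--     return filtered
--
-- def filter_reservations_host(apartments, reservations, username, admin=False):
--     filtered_apartments = filter_apartments_host(apartments, username)
--     filtered_reservations = {}
--
--     for id, reservation in reservations.items():
--         if reservation['apartment'] in filtered_apartments.keys():
--             if (not admin and reservation['status'] == 'pending') or admin:
--                 filtered_reservations[id] = reservation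
--
--     return filtered_reservations
-- ===== SOURCE B (Python) =====
-- def filter_reservations_host(apartments, reservations, username, admin=False):
--     filtered_reservations = {}
--     for id, reservation in reservations.items():
--         apartment = apartments.get(reservation['apartment'])
--         if apartment is not None and apartment['host'] == username \
--                 and (admin or reservation['status'] == 'pending'):
--             filtered_reservations[id] = reservation
--     return filtered_reservations
-- ===== Notes on version B (the rewrite author's own statement) =====
-- stated objective: simpler
-- what changed: Drops the filter_apartments_host helper and its precomputed host-filtered apartment index: one pass over reservations with a direct apartments.get lookup per reservation; Pre_ excludes assoc lists with duplicate apartment ids (no Python dict corresponds to them) and exactly the inputs where A raises KeyError (apartment without 'host', reservation without 'apartment', or a non-admin host-matching reservation without 'status').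
import Mathlib
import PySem

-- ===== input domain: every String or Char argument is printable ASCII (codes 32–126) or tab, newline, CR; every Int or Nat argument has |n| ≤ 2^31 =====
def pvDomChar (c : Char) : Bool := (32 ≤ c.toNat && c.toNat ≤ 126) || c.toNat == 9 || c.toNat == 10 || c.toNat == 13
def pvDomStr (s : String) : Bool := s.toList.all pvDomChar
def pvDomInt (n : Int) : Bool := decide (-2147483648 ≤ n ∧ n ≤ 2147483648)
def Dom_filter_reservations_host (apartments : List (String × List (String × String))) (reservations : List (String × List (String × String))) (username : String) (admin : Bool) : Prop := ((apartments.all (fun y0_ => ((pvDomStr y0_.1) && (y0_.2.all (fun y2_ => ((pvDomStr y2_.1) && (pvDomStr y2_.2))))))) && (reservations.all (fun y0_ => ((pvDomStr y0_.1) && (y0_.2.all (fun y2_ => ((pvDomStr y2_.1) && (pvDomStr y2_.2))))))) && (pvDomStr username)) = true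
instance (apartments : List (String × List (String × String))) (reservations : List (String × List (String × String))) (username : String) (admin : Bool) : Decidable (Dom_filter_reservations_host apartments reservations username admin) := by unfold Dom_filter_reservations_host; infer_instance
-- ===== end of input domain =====

-- B drops A's precomputed host-filtered apartment index and makes a single pass over the
-- reservations with a direct lookup into `apartments` (simpler; return value only, no mutation).

-- first-match association-list lookup: d[k] / d.get(k) on an assoc-list dict (exact for
-- unique-key lists, the only ones a Python dict yields)
def alGet {α : Type} : List (String × α) → String → Option α
  | [], _ => none
  | (k, v) :: rest, key => if k == key then some v else alGet rest key

-- ===== PORT A =====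
def filter_apartments_host (apartments : List (String × List (String × String))) (host : String) : List (String × List (String × String)) :=
  apartments.foldl (fun filtered p =>
    if alGet p.2 "host" = some host then filtered ++ [p] else filtered) []

def filter_reservations_host (apartments : List (String × List (String × String))) (reservations : List (String × List (String × String))) (username : String) (admin : Bool) : List (String × List (String × String)) :=
  let filtered_apartments := filter_apartments_host apartments username
  reservations.foldl (fun fr p =>
    if (alGet p.2 "apartment").any (fun a => (filtered_apartments.map Prod.fst).contains a) then
      if (!admin && (alGet p.2 "status" = some "pending" : Bool)) || admin then fr ++ [p] else fr
    else fr) []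

-- ===== PORT B =====
def filter_reservations_host_alt (apartments : List (String × List (String × String))) (reservations : List (String × List (String × String))) (username : String) (admin : Bool) : List (String × List (String × String)) :=
  reservations.foldl (fun fr p =>
    match (alGet p.2 "apartment").bind (fun a => alGet apartments a) with
    | some apartment =>
        if alGet apartment "host" = some username
            && (admin || (alGet p.2 "status" = some "pending" : Bool)) then fr ++ [p] else fr
    | none => fr) []

-- ===== PRECONDITION & SPEC =====
-- Pre_ excludes (a) apartment lists with duplicate ids, which no Python dict can represent
-- (dict-construction overwrite there is accidental), and (b) exactly the inputs where A raises
-- KeyError: an apartment without 'host', a reservation without 'apartment', or — when not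
-- admin — a reservation pointing at a host-matching apartment but lacking 'status'.
def Pre_filter_reservations_host (apartments : List (String × List (String × String))) (reservations : List (String × List (String × String))) (username : String) (admin : Bool) : Prop :=
  (apartments.map Prod.fst).Nodup ∧
  (∀ p ∈ apartments, alGet p.2 "host" ≠ none) ∧
  (∀ r ∈ reservations, alGet r.2 "apartment" ≠ none) ∧
  (admin = false → ∀ r ∈ reservations,
      (∃ p ∈ apartments, some p.1 = alGet r.2 "apartment" ∧ alGet p.2 "host" = some username) →
      alGet r.2 "status" ≠ none)
instance (apartments : List (String × List (String × String))) (reservations : List (String × List (String × String))) (username : String) (admin : Bool) : Decidable (Pre_filter_reservations_host apartments reservations username admin) := by unfold Pre_filter_reservations_host; infer_instance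

def pvWitness_filter_reservations_host : (List (String × List (String × String))) × (List (String × List (String × String))) × String × Bool :=
  ([("a1", [("host", "u")]), ("a2", [("host", "v")])],
   [("r1", [("apartment", "a1"), ("status", "pending")]), ("r2", [("apartment", "zz")])],
   "u", false)

def Spec_filter_reservations_host (apartments : List (String × List (String × String))) (reservations : List (String × List (String × String))) (username : String) (admin : Bool) (out : List (String × List (String × String))) : Prop := out = filter_reservations_host_alt apartments reservations username admin
instance (apartments : List (String × List (String × String))) (reservations : List (String × List (String × String))) (username : String) (admin : Bool) (out : List (String × List (String × String))) : Decidable (Spec_filter_reservations_host apartments reservations username admin out) := by unfold Spec_filter_reservations_host; infer_instance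

-- ===== CLAIM (what is proved, stated in full; the proofs are below) =====
def Claim_equal_filter_reservations_host : Prop := ∀ (apartments : List (String × List (String × String))) (reservations : List (String × List (String × String))) (username : String) (admin : Bool), Dom_filter_reservations_host apartments reservations username admin → Pre_filter_reservations_host apartments reservations username admin → Spec_filter_reservations_host apartments reservations username admin (filter_reservations_host apartments reservations username admin)

-- ===== LEMMAS AND PROOFS =====

-- generic accumulate-if-append loop is a filter
theorem foldl_if_append {α : Type} (P : α → Prop) [DecidablePred P] :
    ∀ (l acc : List α), l.foldl (fun s x => if P x then s ++ [x] else s) acc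
      = acc ++ l.filter (fun x => decide (P x)) := by
  intro l
  induction l with
  | nil => intro acc; simp
  | cons x rest ih =>
      intro acc
      by_cases h : P x
      · simp [List.foldl_cons, h, ih]
      · simp [List.foldl_cons, h, ih]

-- A's pass-one result is a filter of the apartment list
theorem filter_apartments_host_eq_filter (apartments : List (String × List (String × String))) (host : String) :
    filter_apartments_host apartments host
      = apartments.filter (fun p => alGet p.2 "host" = some host) := by
  unfold filter_apartments_host
  rw [foldl_if_append (fun p => alGet p.2 "host" = some host) apartments []]
  simp

-- under unique apartment ids, membership of `a` among host-filtered ids equals B's direct lookup test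
theorem mem_filtered_iff_lookup (apartments : List (String × List (String × String))) (host : String) (a : String)
    (hnd : (apartments.map Prod.fst).Nodup) :
    (((filter_apartments_host apartments host).map Prod.fst).contains a)
      = (match alGet apartments a with
         | some apt => (alGet apt "host" = some host : Bool)
         | none => false) := by
  rw [filter_apartments_host_eq_filter]
  induction apartments with
  | nil => simp [alGet]
  | cons p rest ih =>
      simp only [List.map_cons, List.nodup_cons] at hnd
      by_cases hk : p.1 = a
      · subst hk
        have htl : p.1 ∉ (rest.filter (fun p => (alGet p.2 "host" = some host : Bool))).map Prod.fst := by
          intro hmem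
          rcases List.mem_map.mp hmem with ⟨q, hq, hqa⟩
          exact hnd.1 (hqa ▸ List.mem_map_of_mem (List.mem_of_mem_filter hq))
        by_cases hh : alGet p.2 "host" = some host
        · simp [hh, alGet]
        · simp [hh, alGet, List.contains_eq_mem, htl]
      · have hne : (p.1 == a) = false := beq_eq_false_iff_ne.mpr hk
        have hne' : (a == p.1) = false := beq_eq_false_iff_ne.mpr (Ne.symm hk)
        by_cases hh : alGet p.2 "host" = some host
        · simp only [List.filter_cons, decide_eq_true_eq, if_pos hh, List.map_cons,
            List.contains_cons, hne', Bool.false_or, alGet, hne]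
          exact ih hnd.2
        · simp only [List.filter_cons, decide_eq_true_eq, if_neg hh, alGet, hne]
          exact ih hnd.2

-- both folds agree step by step once the include-conditions coincide
theorem folds_agree (apartments : List (String × List (String × String))) (username : String) (admin : Bool)
    (hnd : (apartments.map Prod.fst).Nodup) :
    ∀ (reservations acc : List (String × List (String × String))),
    reservations.foldl (fun fr p =>
      if (alGet p.2 "apartment").any (fun a => ((filter_apartments_host apartments username).map Prod.fst).contains a) then
        if (!admin && (alGet p.2 "status" = some "pending" : Bool)) || admin then fr ++ [p] else fr
      else fr) acc
    = reservations.foldl (fun fr p =>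
      match (alGet p.2 "apartment").bind (fun a => alGet apartments a) with
      | some apartment =>
          if alGet apartment "host" = some username
              && (admin || (alGet p.2 "status" = some "pending" : Bool)) then fr ++ [p] else fr
      | none => fr) acc := by
  intro reservations
  induction reservations with
  | nil => intro acc; rfl
  | cons r rest ih =>
      intro acc
      simp only [List.foldl_cons]
      have hstep :
          (if (alGet r.2 "apartment").any (fun a => ((filter_apartments_host apartments username).map Prod.fst).contains a) then
            if (!admin && (alGet r.2 "status" = some "pending" : Bool)) || admin then acc ++ [r] else acc
          else acc)
          = (match (alGet r.2 "apartment").bind (fun a => alGet apartments a) with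
            | some apartment =>
                if alGet apartment "host" = some username
                    && (admin || (alGet r.2 "status" = some "pending" : Bool)) then acc ++ [r] else acc
            | none => acc) := by
        cases hga : alGet r.2 "apartment" with
        | none => simp [Option.any]
        | some a =>
            simp only [Option.any_some, Option.bind_some]
            simp only [mem_filtered_iff_lookup apartments username a hnd]
            cases hap : alGet apartments a with
            | none => simp
            | some apt =>
                by_cases hh : alGet apt "host" = some username
                · simp only [hh, decide_true, Bool.true_and]
                  cases admin <;> simp
                · simp [hh]
      rw [hstep]
      exact ih _

theorem ports_eq (apartments reservations : List (String × List (String × String))) (username : String) (admin : Bool)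
    (hnd : (apartments.map Prod.fst).Nodup) :
    filter_reservations_host apartments reservations username admin
      = filter_reservations_host_alt apartments reservations username admin := by
  unfold filter_reservations_host filter_reservations_host_alt
  exact folds_agree apartments username admin hnd reservations []

-- ===== VERDICT (by name: the statement is the Claim_ definition above) =====
theorem filter_reservations_host_spec : Claim_equal_filter_reservations_host := by
  intro apartments reservations username admin _ hpre
  unfold Spec_filter_reservations_host
  exact ports_eq apartments reservations username admin hpre.1
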